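-- pv_equiv track=rewrite | github.com/thomasjeffreyandersontwin/agile_bots | src/navigation/domain_navigator.py | _parse_dot_notation
-- ===== SOURCE A (Python) =====
-- def _parse_dot_notation(path: str) -> list:
--     """Parse dot notation into parts, handling quoted strings
--
--     Example:
--         'story_graph."Epic Name".create_sub_epic'
--         -> ['story_graph', 'Epic Name', 'create_sub_epic']
--     """
--     parts = []
--     current = ''
--     in_quotes = False
--
--     for char in path:
--         if char == '"':
--             in_quotes = not in_quotes
--         elif char == '.' and not in_quotes:
--             if current:
--                 parts.append(current)
--                 current = ''
--         else:
--             current += char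
--
--     if current:
--         parts.append(current)
--
--     return parts
-- ===== SOURCE B (Python) =====
-- def _parse_dot_notation(path: str) -> list:
--     """Parse dot notation into parts, handling quoted strings (split-based)."""
--     parts = []
--     current = ''
--     for i, seg in enumerate(path.split('"')):
--         if i % 2 == 1:
--             # inside quotes: dots are protected, take the chunk whole
--             current += seg
--         else:
--             pieces = seg.split('.')
--             current += pieces[0]
--             for p in pieces[1:]:
--                 if current:
--                     parts.append(current)
--                 current = p
--     if current:
--         parts.append(current)
--     return parts
-- ===== Notes on version B (the rewrite author's own statement) =====
-- stated objective: faster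
-- what changed: Replaces A's character-by-character state machine with an in_quotes flag by a two-level split decomposition: split the path on the double-quote character into alternating unquoted/quoted segments, append quoted segments whole, and split only unquoted segments on the dot, flushing the running buffer between pieces.
import Mathlib
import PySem

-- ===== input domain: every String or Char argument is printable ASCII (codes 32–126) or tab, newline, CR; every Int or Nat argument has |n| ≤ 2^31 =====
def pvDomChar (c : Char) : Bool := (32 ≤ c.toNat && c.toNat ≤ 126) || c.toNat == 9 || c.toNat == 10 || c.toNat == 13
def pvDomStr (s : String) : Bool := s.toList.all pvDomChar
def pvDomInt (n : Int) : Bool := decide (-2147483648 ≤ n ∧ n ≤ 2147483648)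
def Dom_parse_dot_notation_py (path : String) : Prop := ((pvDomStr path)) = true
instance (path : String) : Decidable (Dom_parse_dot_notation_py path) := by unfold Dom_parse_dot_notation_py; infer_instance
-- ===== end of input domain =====

-- B replaces A's char-by-char quote-state machine with a split('"')/split('.') segment
-- decomposition (same O(n), measurably faster via bulk str.split); equivalence proved for all inputs.


-- ===== PORT A =====
-- one loop iteration of A: toggle quotes on '"', flush on unquoted '.', else append the char
def pvStepA (st : List (List Char) × List Char × Bool) (c : Char) :
    List (List Char) × List Char × Bool :=
  let parts := st.1; let cur := st.2.1; let q := st.2.2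
  if c = '"' then (parts, cur, !q)
  else if c = '.' ∧ ¬(q = true) then
    (if cur ≠ [] then (parts ++ [cur], [], q) else (parts, cur, q))
  else (parts, cur ++ [c], q)

-- the final 'if current: parts.append(current); return parts' shared verbatim by A and B
def pvFinish (parts : List (List Char)) (cur : List Char) : List String :=
  (if cur ≠ [] then parts ++ [cur] else parts).map (fun cs => String.ofList cs)

def parse_dot_notation_py (path : String) : List String :=
  let st := path.toList.foldl pvStepA ([], [], false)
  pvFinish st.1 st.2.1

-- ===== PORT B =====
-- B's inner loop over pieces[1:]: flush current if non-empty, then current := piece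
def pvFlush (st : List (List Char) × List Char) (p : List Char) :
    List (List Char) × List Char :=
  ((if st.2 ≠ [] then st.1 ++ [st.2] else st.1), p)

-- B's outer loop body over the '"'-split segments (i is the enumerate index)
def pvStepB (st : List (List Char) × List Char × Nat) (seg : List Char) :
    List (List Char) × List Char × Nat :=
  let parts := st.1; let cur := st.2.1; let i := st.2.2
  if i % 2 = 1 then (parts, cur ++ seg, i + 1)
  else
    match List.splitOn '.' seg with   -- seg.split('.')
    | [] => (parts, cur, i + 1)       -- unreachable: split never returns []
    | p0 :: rest =>
      let r := rest.foldl pvFlush (parts, cur ++ p0)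
      (r.1, r.2, i + 1)

def parse_dot_notation_py_alt (path : String) : List String :=
  let st := (List.splitOn '"' path.toList).foldl pvStepB ([], [], 0)
  pvFinish st.1 st.2.1

-- ===== PRECONDITION & SPEC =====
def Spec_parse_dot_notation_py (path : String) (out : List String) : Prop := out = parse_dot_notation_py_alt path
instance (path : String) (out : List String) : Decidable (Spec_parse_dot_notation_py path out) := by unfold Spec_parse_dot_notation_py; infer_instance

-- ===== CLAIM (what is proved, stated in full; the proofs are below) =====
def Claim_equal_parse_dot_notation_py : Prop := ∀ (path : String), Dom_parse_dot_notation_py path → Spec_parse_dot_notation_py path (parse_dot_notation_py path)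

-- ===== LEMMAS AND PROOFS =====

-- A's char fold over l, started with quote flag (i % 2 = 1), computes the same
-- (parts, current) as B's segment fold over l.split('"') started at index i.
theorem pvKey (l : List Char) (parts : List (List Char)) (cur : List Char) (i : Nat) :
    (let s := l.foldl pvStepA (parts, cur, decide (i % 2 = 1)); (s.1, s.2.1)) =
    (let s := (List.splitOn '"' l).foldl pvStepB (parts, cur, i); (s.1, s.2.1)) := by
  induction l generalizing parts cur i with
  | nil =>
    simp only [List.foldl]
    rcases Nat.mod_two_eq_zero_or_one i with h | h <;>
      simp [List.splitOn, List.splitOnP_nil, pvStepB, h]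
  | cons c t ih =>
    by_cases hc : c = '"'
    · subst hc
      have hsplit : List.splitOn '"' ('"' :: t) = [] :: List.splitOn '"' t := by
        simp [List.splitOn, List.splitOnP_cons]
      rw [hsplit]
      have hstep : pvStepB (parts, cur, i) [] = (parts, cur, i + 1) := by
        rcases Nat.mod_two_eq_zero_or_one i with h | h <;>
          simp [pvStepB, h, List.splitOn, List.splitOnP_nil]
      have htog : decide ((i + 1) % 2 = 1) = !decide (i % 2 = 1) := by
        rcases Nat.mod_two_eq_zero_or_one i with h | h <;>
          simp [h, Nat.add_mod, Nat.mod_self]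
      simp only [List.foldl, hstep, pvStepA]
      rw [← htog]
      exact ih parts cur (i + 1)
    · have hsplit : List.splitOn '"' (c :: t) =
          List.modifyHead (List.cons c) (List.splitOn '"' t) := by
        simp [List.splitOn, List.splitOnP_cons, hc]
      obtain ⟨s0, ss, hss⟩ : ∃ s0 ss, List.splitOn '"' t = s0 :: ss := by
        rcases h : List.splitOn '"' t with _ | ⟨s0, ss⟩
        · exact absurd h (List.splitOnP_ne_nil _ t)
        · exact ⟨s0, ss, rfl⟩
      rw [hsplit, hss, List.modifyHead_cons]
      rcases Nat.mod_two_eq_zero_or_one i with hpar | hpar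
      · -- outside quotes
        by_cases hd : c = '.'
        · subst hd
          have lhs : pvStepA (parts, cur, decide (i % 2 = 1)) '.' =
              ((if cur ≠ [] then parts ++ [cur] else parts), [], decide (i % 2 = 1)) := by
            by_cases hcur : cur = [] <;> simp [pvStepA, hpar, hcur]
          have ihh := ih ((if cur ≠ [] then parts ++ [cur] else parts)) [] i
          rw [hss] at ihh
          simp only [List.foldl, lhs]
          rw [ihh]
          have hdotsplit : List.splitOn '.' ('.' :: s0) = [] :: List.splitOn '.' s0 := by
            simp [List.splitOn, List.splitOnP_cons]
          obtain ⟨q0, qs, hqs⟩ : ∃ q0 qs, List.splitOn '.' s0 = q0 :: qs := by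
            rcases h : List.splitOn '.' s0 with _ | ⟨q0, qs⟩
            · exact absurd h (List.splitOnP_ne_nil _ s0)
            · exact ⟨q0, qs, rfl⟩
          have e1 : pvStepB (parts, cur, i) ('.' :: s0) =
              pvStepB ((if cur ≠ [] then parts ++ [cur] else parts), [], i) s0 := by
            simp only [pvStepB, hpar, hdotsplit, hqs]
            by_cases hcur : cur = [] <;>
              simp [hcur, List.foldl, pvFlush]
          simp only [List.foldl, e1]
        · have lhs : pvStepA (parts, cur, decide (i % 2 = 1)) c =
              (parts, cur ++ [c], decide (i % 2 = 1)) := by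
            simp [pvStepA, hpar, hc, hd]
          have ihh := ih parts (cur ++ [c]) i
          rw [hss] at ihh
          simp only [List.foldl, lhs]
          rw [ihh]
          obtain ⟨q0, qs, hqs⟩ : ∃ q0 qs, List.splitOn '.' s0 = q0 :: qs := by
            rcases h : List.splitOn '.' s0 with _ | ⟨q0, qs⟩
            · exact absurd h (List.splitOnP_ne_nil _ s0)
            · exact ⟨q0, qs, rfl⟩
          have hdotsplit : List.splitOn '.' (c :: s0) = (c :: q0) :: qs := by
            simp only [List.splitOn] at hqs ⊢
            rw [List.splitOnP_cons]
            simp [hd, hqs]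
          have e1 : pvStepB (parts, cur, i) (c :: s0) =
              pvStepB (parts, cur ++ [c], i) s0 := by
            simp only [pvStepB, hpar, hdotsplit, hqs]
            rw [List.append_cons cur c q0]
            simp
          simp only [List.foldl, e1]
      · -- inside quotes: chars (including '.') are appended verbatim
        have lhs : pvStepA (parts, cur, decide (i % 2 = 1)) c =
            (parts, cur ++ [c], decide (i % 2 = 1)) := by
          simp [pvStepA, hpar, hc]
        have ihh := ih parts (cur ++ [c]) i
        rw [hss] at ihh
        simp only [List.foldl, lhs]
        rw [ihh]
        have e1 : pvStepB (parts, cur, i) (c :: s0) =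
            pvStepB (parts, cur ++ [c], i) s0 := by
          simp only [pvStepB, hpar]
          rw [List.append_cons cur c s0]
          simp
        simp only [List.foldl, e1]

-- ===== VERDICT (by name: the statement is the Claim_ definition above) =====
theorem parse_dot_notation_py_spec : Claim_equal_parse_dot_notation_py := by
  intro path _
  unfold Spec_parse_dot_notation_py parse_dot_notation_py parse_dot_notation_py_alt
  have h := pvKey path.toList [] [] 0
  simp only [Prod.mk.injEq] at h
  show pvFinish (List.foldl pvStepA ([], [], decide (0 % 2 = 1)) path.toList).1
        (List.foldl pvStepA ([], [], decide (0 % 2 = 1)) path.toList).2.1 =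
      pvFinish (List.foldl pvStepB ([], [], 0) (List.splitOn '"' path.toList)).1
        (List.foldl pvStepB ([], [], 0) (List.splitOn '"' path.toList)).2.1
  rw [h.1, h.2]
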